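-- pv_equiv track=rewrite | github.com/cirosantilli/project-euler-solvers | solvers/272.py | inert_prefix_sums
-- ===== SOURCE A (Python) =====
-- import math
-- from typing import List, Tuple
--
-- def sieve_primes(limit: int) -> List[int]:
--     """Return all primes <= limit (simple bytearray sieve)."""
--     if limit < 2:
--         return []
--     sieve = bytearray(b"\x01") * (limit + 1)
--     sieve[0:2] = b"\x00\x00"
--     # remove evens
--     if limit >= 4:
--         sieve[4 : limit + 1 : 2] = b"\x00" * (((limit - 4) // 2) + 1)
--     r = int(math.isqrt(limit))
--     for p in range(3, r + 1, 2):
--         if sieve[p]: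
--             step = p * 2
--             start = p * p
--             sieve[start : limit + 1 : step] = b"\x00" * (((limit - start) // step) + 1)
--     primes = [2]
--     primes.extend(i for i in range(3, limit + 1, 2) if sieve[i])
--     return primes
--
-- def inert_prefix_sums(limit: int) -> Tuple[List[int], List[int]]:
--     """Prefix sums for the 'inert' factor b.
--
--     Any prime power p^a contributes 3 cube-roots of 1 iff:
--       - p ≡ 1 (mod 3), any a>=1, or
--       - p = 3 and a>=2.
--     All other primes are inert (contribute only the trivial root).
--
--     In the final decomposition n = (good-part) * b:
--       - b must NOT contain any prime p ≡ 1 (mod 3)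
--       - b must NOT be divisible by 9 (else it would contribute p=3 as a good prime)
--       - for the 'no-3' variant, b must also not be divisible by 3.
--
--     Returns:
--       pref_allow3[t] = sum of all b<=t allowed to include a single factor 3 (not 9)
--       pref_no3[t]    = sum of all b<=t with the same restriction and additionally 3∤b
--     """
--     primes = sieve_primes(limit)
--     allow3 = bytearray(b"\x01") * (limit + 1)
--     allow3[0] = 0
--
--     # forbid 3^2
--     if limit >= 9:
--         allow3[9 : limit + 1 : 9] = b"\x00" * (((limit - 9) // 9) + 1)
--
--     # forbid primes p ≡ 1 (mod 3)
--     for p in primes: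
--         if p % 3 == 1:
--             allow3[p : limit + 1 : p] = b"\x00" * (((limit - p) // p) + 1)
--
--     no3 = allow3[:]  # copy
--     if limit >= 3:
--         no3[3 : limit + 1 : 3] = b"\x00" * (((limit - 3) // 3) + 1)
--
--     pref_allow3 = [0] * (limit + 1)
--     pref_no3 = [0] * (limit + 1)
--     s1 = 0
--     s2 = 0
--     for i in range(1, limit + 1):
--         if allow3[i]:
--             s1 += i
--         if no3[i]:
--             s2 += i
--         pref_allow3[i] = s1
--         pref_no3[i] = s2
--     return pref_allow3, pref_no3
-- ===== SOURCE B (Python) =====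
-- import math
-- from typing import List, Tuple
--
-- def inert_prefix_sums(limit: int) -> Tuple[List[int], List[int]]:
--     """Smallest-prime-factor sieve + multiplicative DP instead of per-prime multiple marking."""
--     spf = list(range(limit + 1))
--     for i in range(2, math.isqrt(limit) + 1):
--         if spf[i] == i:
--             for j in range(i * i, limit + 1, i):
--                 if spf[j] == j:
--                     spf[j] = i
--     allowed = bytearray(limit + 1)
--     if limit >= 1:
--         allowed[1] = 1
--     for n in range(2, limit + 1):
--         p = spf[n]
--         m = n // p
--         if p % 3 == 1 or (p == 3 and m % 3 == 0):
--             continue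
--         allowed[n] = allowed[m]
--     pref_allow3 = [0] * (limit + 1)
--     pref_no3 = [0] * (limit + 1)
--     s1 = 0
--     s2 = 0
--     for i in range(1, limit + 1):
--         if allowed[i]:
--             s1 += i
--             if i % 3:
--                 s2 += i
--         pref_allow3[i] = s1
--         pref_no3[i] = s2
--     return pref_allow3, pref_no3
-- ===== Notes on version B (the rewrite author's own statement) =====
-- stated objective: alternative
-- what changed: Replaces the prime-list Eratosthenes sieve plus per-bad-prime multiple-marking (and the separate no-three bytearray) with a smallest-prime-factor sieve and a multiplicative DP that decides each number from its smallest prime factor and its cofactor, deriving the second prefix sum inline from the residue test.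
import Mathlib
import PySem

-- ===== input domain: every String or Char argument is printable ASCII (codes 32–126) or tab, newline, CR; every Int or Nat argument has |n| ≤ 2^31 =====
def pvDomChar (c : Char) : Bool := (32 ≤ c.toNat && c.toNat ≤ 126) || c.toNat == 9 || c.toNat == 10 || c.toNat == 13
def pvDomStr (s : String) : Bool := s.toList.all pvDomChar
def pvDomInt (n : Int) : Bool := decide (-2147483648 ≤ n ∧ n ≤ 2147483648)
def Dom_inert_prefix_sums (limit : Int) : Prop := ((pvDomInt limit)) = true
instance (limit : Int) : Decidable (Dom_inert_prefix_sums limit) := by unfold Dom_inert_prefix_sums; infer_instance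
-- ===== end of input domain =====

-- B replaces A's prime-list sieve + per-bad-prime multiple marking by a smallest-prime-factor
-- sieve with a multiplicative DP (objective: alternative algorithm of the same cost).
-- Bytearrays are modelled as Array Nat; every read/write both programs perform is in bounds.

-- range(a, b, s) for s > 0 (exact Python range semantics on naturals)
def pvRangeN (a b s : Nat) : List Nat :=
  if _h : a < b ∧ 0 < s then a :: pvRangeN (a + s) b s else []
termination_by b - a
decreasing_by omega

-- ===== PORT A =====

-- byte-slice assignment arr[a:b:s] = zeros (RHS lengths match in every call A makes)
def pvZeroSlice (arr : Array Nat) (a b s : Nat) : Array Nat :=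
  (pvRangeN a b s).foldl (fun t i => t.setIfInBounds i 0) arr

-- sieve after `sieve[0:2] = b"\x00\x00"` and the even-removal slice
def pvSieveBase (limit : Nat) : Array Nat :=
  let s := Array.replicate (limit + 1) 1
  let s := (s.setIfInBounds 0 0).setIfInBounds 1 0
  if 4 ≤ limit then pvZeroSlice s 4 (limit + 1) 2 else s

-- the odd-p marking loop
def pvSieveLoop (limit : Nat) : Array Nat :=
  (pvRangeN 3 (Nat.sqrt limit + 1) 2).foldl
    (fun s p => if s.getD p 0 = 1 then pvZeroSlice s (p * p) (limit + 1) (2 * p) else s)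
    (pvSieveBase limit)

def pvSievePrimes (limit : Nat) : List Nat :=
  if limit < 2 then []
  else
    let s := pvSieveLoop limit
    2 :: (pvRangeN 3 (limit + 1) 2).filter (fun i => s.getD i 0 = 1)

-- allow3 after the 9-marking and the bad-prime loop
def pvAllow3 (n : Nat) (primes : List Nat) : Array Nat :=
  let a0 := (Array.replicate (n + 1) 1).setIfInBounds 0 0
  let a1 := if 9 ≤ n then pvZeroSlice a0 9 (n + 1) 9 else a0
  primes.foldl (fun a p => if p % 3 = 1 then pvZeroSlice a p (n + 1) p else a) a1

def pvNo3 (n : Nat) (allow3 : Array Nat) : Array Nat :=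
  if 3 ≤ n then pvZeroSlice allow3 3 (n + 1) 3 else allow3

def inert_prefix_sums (limit : Int) : List Int × List Int :=
  let n := limit.toNat   -- Pre_: 0 ≤ limit (A raises IndexError on negative limit)
  let allow3 := pvAllow3 n (pvSievePrimes n)
  let no3 := pvNo3 n allow3
  let st := (pvRangeN 1 (n + 1) 1).foldl
    (fun (st : Int × Int × List Int × List Int) i =>
      let s1 := if allow3.getD i 0 = 1 then st.1 + (i : Int) else st.1
      let s2 := if no3.getD i 0 = 1 then st.2.1 + (i : Int) else st.2.1
      (s1, s2, st.2.2.1 ++ [s1], st.2.2.2 ++ [s2]))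
    (0, 0, [0], [0])
  (st.2.2.1, st.2.2.2)

-- ===== PORT B =====

-- smallest-prime-factor sieve (Source B's double loop)
def pvSpf (n : Nat) : Array Nat :=
  (pvRangeN 2 (Nat.sqrt n + 1) 1).foldl
    (fun f i =>
      if f.getD i 0 = i then
        (pvRangeN (i * i) (n + 1) i).foldl
          (fun g j => if g.getD j 0 = j then g.setIfInBounds j i else g) f
      else f)
    (List.range (n + 1)).toArray

-- the multiplicative DP over spf
def pvAllowed (n : Nat) (spf : Array Nat) : Array Nat :=
  let a0 := Array.replicate (n + 1) 0
  let a1 := if 1 ≤ n then a0.setIfInBounds 1 1 else a0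
  (pvRangeN 2 (n + 1) 1).foldl
    (fun a m =>
      let p := spf.getD m 0
      let q := m / p
      if p % 3 = 1 ∨ (p = 3 ∧ q % 3 = 0) then a
      else a.setIfInBounds m (a.getD q 0))
    a1

def inert_prefix_sums_alt (limit : Int) : List Int × List Int :=
  let n := limit.toNat
  let allowed := pvAllowed n (pvSpf n)
  let st := (pvRangeN 1 (n + 1) 1).foldl
    (fun (st : Int × Int × List Int × List Int) i =>
      if allowed.getD i 0 = 1 then
        let s1 := st.1 + (i : Int)
        let s2 := if i % 3 ≠ 0 then st.2.1 + (i : Int) else st.2.1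
        (s1, s2, st.2.2.1 ++ [s1], st.2.2.2 ++ [s2])
      else (st.1, st.2.1, st.2.2.1 ++ [st.1], st.2.2.2 ++ [st.2.1]))
    (0, 0, [0], [0])
  (st.2.2.1, st.2.2.2)

-- ===== PRECONDITION & SPEC =====

-- A raises (IndexError) on every negative limit, so Pre_ keeps exactly the nonnegative inputs.
def Pre_inert_prefix_sums (limit : Int) : Prop := 0 ≤ limit
instance (limit : Int) : Decidable (Pre_inert_prefix_sums limit) := by
  unfold Pre_inert_prefix_sums; infer_instance

def pvWitness_inert_prefix_sums : Int := 10

def Spec_inert_prefix_sums (limit : Int) (out : List Int × List Int) : Prop := out = inert_prefix_sums_alt limit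
instance (limit : Int) (out : List Int × List Int) : Decidable (Spec_inert_prefix_sums limit out) := by unfold Spec_inert_prefix_sums; infer_instance

-- ===== CLAIM (what is proved, stated in full; the proofs are below) =====
def Claim_equal_inert_prefix_sums : Prop := ∀ (limit : Int), Dom_inert_prefix_sums limit → Pre_inert_prefix_sums limit → Spec_inert_prefix_sums limit (inert_prefix_sums limit)

-- ===== LEMMAS AND PROOFS =====

theorem mem_pvRangeN {a b s : Nat} (hs : 0 < s) (j : Nat) :
    j ∈ pvRangeN a b s ↔ a ≤ j ∧ j < b ∧ s ∣ (j - a) := by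
  suffices H : ∀ (k a : Nat), b - a ≤ k → (j ∈ pvRangeN a b s ↔ a ≤ j ∧ j < b ∧ s ∣ (j - a)) from
    H (b - a) a (le_refl _)
  intro k
  induction k with
  | zero =>
    intro a hle
    rw [pvRangeN, dif_neg (by omega)]
    simp only [List.not_mem_nil, false_iff]
    omega
  | succ k ih =>
    intro a hle
    by_cases h : a < b ∧ 0 < s
    · rw [pvRangeN, dif_pos h, List.mem_cons, ih (a + s) (by omega)]
      constructor
      · rintro (rfl | ⟨h1, h2, k', hk⟩)
        · exact ⟨le_refl _, h.1, by simp⟩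
        · exact ⟨by omega, h2, k' + 1, by rw [Nat.mul_succ]; omega⟩
      · rintro ⟨h1, h2, k', hk⟩
        rcases Nat.eq_zero_or_pos k' with rfl | hk0
        · left; omega
        · right
          have hke : k' - 1 + 1 = k' := by omega
          rw [← hke, Nat.mul_succ] at hk
          exact ⟨by omega, h2, k' - 1, by omega⟩
    · rw [pvRangeN, dif_neg h]
      simp only [List.not_mem_nil, false_iff]
      rintro ⟨h1, h2, -⟩
      exact h ⟨by omega, hs⟩

theorem pvRangeN_pairwise (a b s : Nat) (hs : 0 < s) :
    (pvRangeN a b s).Pairwise (· < ·) := by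
  suffices H : ∀ (k a : Nat), b - a ≤ k → (pvRangeN a b s).Pairwise (· < ·) from
    H (b - a) a (le_refl _)
  intro k
  induction k with
  | zero => intro a hle; rw [pvRangeN, dif_neg (by omega)]; exact List.Pairwise.nil
  | succ k ih =>
    intro a hle
    by_cases h : a < b ∧ 0 < s
    · rw [pvRangeN, dif_pos h]
      refine List.Pairwise.cons (fun j hj => ?_) (ih (a + s) (by omega))
      have := (mem_pvRangeN hs j).mp hj
      omega
    · rw [pvRangeN, dif_neg h]; exact List.Pairwise.nil

theorem getD_setIfInBounds (a : Array Nat) (i j v : Nat) :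
    (a.setIfInBounds i v).getD j 0 = if i = j ∧ i < a.size then v else a.getD j 0 := by
  simp only [Array.getD_eq_getD_getElem?, Array.getElem?_setIfInBounds]
  split_ifs with h1 h2 h3 <;> simp_all <;> omega

theorem size_foldl_zero (l : List Nat) (arr : Array Nat) :
    (l.foldl (fun t i => t.setIfInBounds i 0) arr).size = arr.size := by
  induction l generalizing arr with
  | nil => rfl
  | cons x l ih => simp [List.foldl_cons, ih, Array.size_setIfInBounds]

theorem getD_foldl_zero (l : List Nat) (arr : Array Nat) (j : Nat) :
    (l.foldl (fun t i => t.setIfInBounds i 0) arr).getD j 0 =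
      if j ∈ l ∧ j < arr.size then 0 else arr.getD j 0 := by
  induction l generalizing arr with
  | nil => simp
  | cons x l ih =>
    rw [List.foldl_cons, ih, Array.size_setIfInBounds, getD_setIfInBounds]
    by_cases hs : j < arr.size
    · by_cases hm : j ∈ l
      · simp [hm, hs, List.mem_cons]
      · by_cases hx : x = j
        · subst hx; simp [hm, hs, List.mem_cons]
        · simp [hm, hs, hx, List.mem_cons, Ne.symm hx]
    · by_cases hx : x = j
      · subst hx; simp [hs, List.mem_cons]
      · simp [hs, hx, List.mem_cons]

theorem getD_foldl_mark (i : Nat) (l : List Nat) (hl : l.Pairwise (· < ·)) (f : Array Nat) (j : Nat) :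
    ((l.foldl (fun g j' => if g.getD j' 0 = j' then g.setIfInBounds j' i else g) f)).getD j 0 =
      if j ∈ l ∧ f.getD j 0 = j ∧ j < f.size then i else f.getD j 0 := by
  induction l generalizing f with
  | nil => simp
  | cons x l ih =>
    have hx : ∀ y ∈ l, x < y := (List.pairwise_cons.mp hl).1
    rw [List.foldl_cons, ih (List.pairwise_cons.mp hl).2]
    by_cases hg : f.getD x 0 = x
    · rw [if_pos hg]
      simp only [Array.size_setIfInBounds, getD_setIfInBounds]
      by_cases hxj : x = j
      · subst hxj
        have hnx : x ∉ l := fun h => absurd (hx x h) (lt_irrefl x)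
        by_cases hlt : x < f.size
        · simp [hnx, hlt, hg, List.mem_cons]
        · simp [hnx, hlt, List.mem_cons]
      · have hjx : ¬ j = x := fun h => hxj h.symm
        simp [List.mem_cons, hxj, hjx]
    · rw [if_neg hg]
      by_cases hxj : j = x
      · subst hxj; rw [Array.getD_eq_getD_getElem?] at hg; simp [List.mem_cons, hg]
      · simp [List.mem_cons, hxj]

theorem size_foldl_mark (i : Nat) (l : List Nat) (f : Array Nat) :
    ((l.foldl (fun g j' => if g.getD j' 0 = j' then g.setIfInBounds j' i else g) f)).size = f.size := by
  induction l generalizing f with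
  | nil => rfl
  | cons x l ih =>
    rw [List.foldl_cons]
    by_cases hg : f.getD x 0 = x
    · rw [if_pos hg, ih, Array.size_setIfInBounds]
    · rw [if_neg hg, ih]

def pvGood (j : Nat) : Prop :=
  ¬ (9 ∣ j) ∧ ∀ p : Nat, p.Prime → p ∣ j → p % 3 ≠ 1

def pvSurv (m j : Nat) : Prop :=
  j = 2 ∨ (2 ≤ j ∧ ¬ 2 ∣ j ∧ ∀ q, q.Prime → ¬ 2 ∣ q → q < m → q ∣ j → ¬ q * q ≤ j)

theorem pvGood_one : pvGood 1 :=
  ⟨by omega, fun p hp hd _ => absurd (Nat.eq_one_of_dvd_one hd) hp.ne_one⟩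

theorem pvGood_step (m : Nat) (hm : 2 ≤ m) :
    pvGood m ↔
      (¬ (m.minFac % 3 = 1 ∨ (m.minFac = 3 ∧ (m / m.minFac) % 3 = 0)) ∧ pvGood (m / m.minFac)) := by
  have hp : m.minFac.Prime := Nat.minFac_prime (by omega)
  have hd : m.minFac ∣ m := Nat.minFac_dvd m
  have hmul : m.minFac * (m / m.minFac) = m := Nat.mul_div_cancel' hd
  have hrd : (m / m.minFac) ∣ m := Nat.div_dvd_of_dvd hd
  constructor
  · rintro ⟨h9, hP⟩
    refine ⟨?_, ?_, ?_⟩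
    · rintro (h1 | ⟨h3, hr0⟩)
      · exact hP m.minFac hp hd h1
      · apply h9
        have h3r : 3 ∣ (m / m.minFac) := Nat.dvd_of_mod_eq_zero hr0
        rcases h3r with ⟨k, hk⟩
        rw [h3] at hk
        refine ⟨k, ?_⟩
        rw [← hmul, h3, hk]; ring
    · exact fun h => h9 (h.trans hrd)
    · exact fun p hpp hpd => hP p hpp (hpd.trans hrd)
  · rintro ⟨hnot, h9r, hPr⟩
    constructor
    · intro h9
      have h3m : 3 ∣ m := dvd_trans (by norm_num) h9
      have hle : m.minFac ≤ 3 := Nat.minFac_le_of_dvd (by norm_num) h3m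
      have h2le : 2 ≤ m.minFac := hp.two_le
      interval_cases h : m.minFac
      · -- minFac = 2
        have hco : Nat.Coprime 9 2 := by norm_num
        have h9' : (9 : Nat) ∣ 2 * (m / 2) := by rw [hmul]; exact h9
        exact h9r (hco.dvd_of_dvd_mul_left h9')
      · -- minFac = 3
        have hr3 : ¬ 3 ∣ (m / 3) := by
          intro hdr
          exact hnot (Or.inr ⟨rfl, by omega⟩)
        apply hr3
        have h3r : 3 * 3 ∣ 3 * (m / 3) := by
          rw [hmul]
          exact (by norm_num : (9 : Nat) = 3 * 3) ▸ h9
        exact (Nat.mul_dvd_mul_iff_left (by norm_num : 0 < 3)).mp h3r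
    · intro p hpp hpd
      have hpd' : p ∣ m.minFac * (m / m.minFac) := by rw [hmul]; exact hpd
      rcases (Nat.Prime.dvd_mul hpp).mp hpd' with hl | hr
      · have : p = m.minFac := (Nat.prime_dvd_prime_iff_eq hpp hp).mp hl
        subst this
        exact fun h1 => hnot (Or.inl h1)
      · exact hPr p hpp hr

theorem pvSurv_mono {m' m j : Nat} (h : m' ≤ m) (hs : pvSurv m j) : pvSurv m' j := by
  rcases hs with rfl | ⟨h2, hodd, hq⟩
  · exact Or.inl rfl
  · exact Or.inr ⟨h2, hodd, fun q hq1 hq2 hq3 => hq q hq1 hq2 (by omega)⟩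

theorem pvSurv_of_prime (m j : Nat) (hp : j.Prime) : pvSurv m j := by
  by_cases h2 : j = 2
  · exact Or.inl h2
  · refine Or.inr ⟨hp.two_le, ?_, ?_⟩
    · intro hd
      exact h2 ((Nat.prime_dvd_prime_iff_eq Nat.prime_two hp).mp hd).symm
    · intro q hq _ _ hqd hsq
      have : q = j := (Nat.prime_dvd_prime_iff_eq hq hp).mp hqd
      subst this
      nlinarith [hp.two_le]

theorem prime_of_pvSurv {limit m j : Nat} (hj : j ≤ limit) (hm : Nat.sqrt limit + 1 ≤ m)
    (hs : pvSurv m j) : j.Prime := by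
  rcases hs with rfl | ⟨h2, hodd, hq⟩
  · exact Nat.prime_two
  · by_contra hnp
    have hpos : 0 < j := by omega
    have hqp : j.minFac.Prime := Nat.minFac_prime (by omega)
    have hqd : j.minFac ∣ j := Nat.minFac_dvd j
    have hsq2 : j.minFac ^ 2 ≤ j := Nat.minFac_sq_le_self hpos hnp
    have hsq : j.minFac * j.minFac ≤ j := by nlinarith
    have hqodd : ¬ 2 ∣ j.minFac := fun h => hodd (h.trans hqd)
    have hlt : j.minFac < m := by
      have : j.minFac ≤ Nat.sqrt limit := Nat.le_sqrt'.mpr (le_trans hsq2 hj)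
      omega
    exact hq j.minFac hqp hqodd hlt hqd hsq

theorem pvSurv_three (j : Nat) : pvSurv 3 j ↔ j = 2 ∨ (2 ≤ j ∧ ¬ 2 ∣ j) := by
  constructor
  · rintro (rfl | ⟨h2, hodd, -⟩)
    · exact Or.inl rfl
    · exact Or.inr ⟨h2, hodd⟩
  · rintro (rfl | ⟨h2, hodd⟩)
    · exact Or.inl rfl
    · refine Or.inr ⟨h2, hodd, fun q hq1 hq2 hq3 => ?_⟩
      exfalso
      have := hq1.two_le
      interval_cases q
      · exact hq2 (dvd_refl 2)

theorem size_pvSieveBase (limit : Nat) : (pvSieveBase limit).size = limit + 1 := by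
  unfold pvSieveBase pvZeroSlice
  by_cases h4 : 4 ≤ limit
  · rw [if_pos h4, size_foldl_zero]
    simp [Array.size_setIfInBounds, Array.size_replicate]
  · rw [if_neg h4]
    simp [Array.size_setIfInBounds, Array.size_replicate]

theorem getD_replicate_one (n j : Nat) :
    (Array.replicate n 1).getD j 0 = if j < n then 1 else 0 := by
  rw [Array.getD_eq_getD_getElem?, Array.getElem?_replicate]
  split_ifs <;> simp

theorem getD_pvSieveBase (limit j : Nat) (hl : 2 ≤ limit) (hj : j ≤ limit) :
    ((pvSieveBase limit).getD j 0 = 1 ↔ pvSurv 3 j) := by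
  rw [pvSurv_three]
  unfold pvSieveBase pvZeroSlice
  have hsz : (((Array.replicate (limit + 1) 1).setIfInBounds 0 0).setIfInBounds 1 0).size = limit + 1 := by
    simp [Array.size_setIfInBounds, Array.size_replicate]
  have hbase : (((Array.replicate (limit + 1) 1).setIfInBounds 0 0).setIfInBounds 1 0).getD j 0
      = if j ≤ 1 then 0 else 1 := by
    rw [getD_setIfInBounds, getD_setIfInBounds, getD_replicate_one]
    simp only [Array.size_setIfInBounds, Array.size_replicate]
    split_ifs <;> omega
  by_cases h4 : 4 ≤ limit
  · rw [if_pos h4, getD_foldl_zero, hsz, hbase]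
    by_cases hm : j ∈ pvRangeN 4 (limit + 1) 2
    · have hf := (mem_pvRangeN (by norm_num) j).mp hm
      have hc : j ∈ pvRangeN 4 (limit + 1) 2 ∧ j < limit + 1 := ⟨hm, by omega⟩
      rw [if_pos hc]
      omega
    · have hf : ¬ (4 ≤ j ∧ j < limit + 1 ∧ 2 ∣ (j - 4)) :=
        fun h => hm ((mem_pvRangeN (by norm_num) j).mpr h)
      have hc : ¬ (j ∈ pvRangeN 4 (limit + 1) 2 ∧ j < limit + 1) := fun h => hm h.1
      rw [if_neg hc]
      by_cases hj1 : j ≤ 1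
      · rw [if_pos hj1]; omega
      · rw [if_neg hj1]; omega
  · rw [if_neg h4, hbase]
    by_cases hj1 : j ≤ 1
    · rw [if_pos hj1]; omega
    · rw [if_neg hj1]; omega

theorem size_pvZeroSlice (arr : Array Nat) (a b s : Nat) :
    (pvZeroSlice arr a b s).size = arr.size := by
  unfold pvZeroSlice; exact size_foldl_zero _ _

theorem getD_pvZeroSlice (arr : Array Nat) (a b s j : Nat) :
    (pvZeroSlice arr a b s).getD j 0 =
      if j ∈ pvRangeN a b s ∧ j < arr.size then 0 else arr.getD j 0 := by
  unfold pvZeroSlice; exact getD_foldl_zero _ _ _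

theorem prime_of_pvSurv_self (p : Nat) (h3 : 3 ≤ p) (hodd : ¬ 2 ∣ p) (hs : pvSurv p p) :
    p.Prime := by
  rcases hs with h2 | ⟨h2, -, hq⟩
  · omega
  · by_contra hnp
    have hpos : 0 < p := by omega
    have htp : p.minFac.Prime := Nat.minFac_prime (by omega)
    have htd : p.minFac ∣ p := Nat.minFac_dvd p
    have hsq2 : p.minFac ^ 2 ≤ p := Nat.minFac_sq_le_self hpos hnp
    have hsq : p.minFac * p.minFac ≤ p := by nlinarith
    have htodd : ¬ 2 ∣ p.minFac := fun h => hodd (h.trans htd)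
    have htlt : p.minFac < p := by
      rcases Nat.lt_or_ge p.minFac p with h | h
      · exact h
      · have := Nat.minFac_le hpos
        have heq : p.minFac = p := by omega
        exact absurd (heq ▸ htp) hnp
    exact hq p.minFac htp htodd htlt htd hsq

theorem pvSurv_succ2 (p j : Nat) (h3 : 3 ≤ p) (hodd : ¬ 2 ∣ p) (hp : p.Prime) :
    pvSurv (p + 2) j ↔ (pvSurv p j ∧ ¬ (p ∣ j ∧ p * p ≤ j)) := by
  constructor
  · intro h
    refine ⟨pvSurv_mono (by omega) h, ?_⟩
    rintro ⟨hdvd, hsq⟩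
    rcases h with rfl | ⟨h2, hoj, hq⟩
    · have := Nat.le_of_dvd (by norm_num) hdvd
      omega
    · exact hq p hp hodd (by omega) hdvd hsq
  · rintro ⟨hs, hnm⟩
    rcases hs with rfl | ⟨h2, hoj, hq⟩
    · exact Or.inl rfl
    · refine Or.inr ⟨h2, hoj, fun q hq1 hq2 hq3 hq4 hq5 => ?_⟩
      by_cases hqp : q < p
      · exact hq q hq1 hq2 hqp hq4 hq5
      · have : q = p := by omega
        subst this
        exact hnm ⟨hq4, hq5⟩

theorem pvSurv_succ2_notprime (p j : Nat) (h3 : 3 ≤ p) (hodd : ¬ 2 ∣ p) (hnp : ¬ p.Prime) :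
    pvSurv (p + 2) j ↔ pvSurv p j := by
  constructor
  · exact pvSurv_mono (by omega)
  · rintro (rfl | ⟨h2, hoj, hq⟩)
    · exact Or.inl rfl
    · refine Or.inr ⟨h2, hoj, fun q hq1 hq2 hq3 hq4 hq5 => ?_⟩
      by_cases hqp : q < p
      · exact hq q hq1 hq2 hqp hq4 hq5
      · have : q = p := by omega
        subst this
        exact hnp hq1

theorem pvMarked_iff (p j limit : Nat) (h3 : 3 ≤ p) (hoddp : ¬ 2 ∣ p) (hj : j ≤ limit)
    (hsurv : pvSurv p j) :
    (p * p ≤ j ∧ j < limit + 1 ∧ 2 * p ∣ (j - p * p)) ↔ (p ∣ j ∧ p * p ≤ j) := by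
  constructor
  · rintro ⟨h1, h2, k, hk⟩
    refine ⟨⟨p + 2 * k, ?_⟩, h1⟩
    have e : p * (p + 2 * k) = p * p + 2 * p * k := by ring
    rw [e]
    omega
  · rintro ⟨⟨m', rfl⟩, hsq⟩
    have hoddj : ¬ 2 ∣ p * m' := by
      rcases hsurv with h2 | ⟨-, hoj, -⟩
      · have := Nat.le_of_dvd (by norm_num) (⟨m', h2.symm⟩ : p ∣ 2)
        omega
      · exact hoj
    have hm'odd : ¬ 2 ∣ m' := by
      rintro ⟨t, rfl⟩
      exact hoddj ⟨p * t, by ring⟩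
    have hppos : 0 < p := by omega
    have hm'ge : p ≤ m' := Nat.le_of_mul_le_mul_left hsq hppos
    have hpodd2 : ¬ 2 ∣ p := hoddp
    have heven : 2 ∣ (m' - p) := by omega
    rcases heven with ⟨e, he⟩
    refine ⟨hsq, by omega, e, ?_⟩
    have e1 : p + (m' - p) = m' := by omega
    have e2 : p * (p + (m' - p)) = p * p + p * (m' - p) := by ring
    rw [e1] at e2
    have e3 : p * (m' - p) = p * (2 * e) := by rw [he]
    have e4 : p * (2 * e) = 2 * p * e := by ring
    omega

theorem sieve_fold_inv (limit : Nat) :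
    ∀ (k p : Nat) (s : Array Nat), 3 ≤ p → ¬ 2 ∣ p →
      Nat.sqrt limit + 1 - p ≤ k → s.size = limit + 1 →
      (∀ j, j ≤ limit → (s.getD j 0 = 1 ↔ pvSurv p j)) →
      ∀ j, j ≤ limit →
        (((pvRangeN p (Nat.sqrt limit + 1) 2).foldl
          (fun s p => if s.getD p 0 = 1 then pvZeroSlice s (p * p) (limit + 1) (2 * p) else s)
          s).getD j 0 = 1 ↔ j.Prime) := by
  intro k
  induction k with
  | zero =>
    intro p s h3 hodd hk hsz hinv j hj
    rw [pvRangeN, dif_neg (by omega)]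
    simp only [List.foldl_nil]
    rw [hinv j hj]
    exact ⟨fun hs => prime_of_pvSurv hj (by omega) hs, fun hp => pvSurv_of_prime _ _ hp⟩
  | succ k ih =>
    intro p s h3 hodd hk hsz hinv j hj
    by_cases hlt : p < Nat.sqrt limit + 1
    · rw [pvRangeN, dif_pos ⟨hlt, by norm_num⟩, List.foldl_cons]
      have hple : p ≤ limit := le_trans (by omega) (Nat.sqrt_le_self limit)
      by_cases hg : s.getD p 0 = 1
      · -- p survives: p is prime, mark odd multiples of p from p*p
        have hsp : pvSurv p p := (hinv p hple).mp hg
        have hp : p.Prime := prime_of_pvSurv_self p h3 hodd hsp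
        rw [if_pos hg]
        refine ih (p + 2) _ (by omega) (by omega) (by omega)
          (by rw [size_pvZeroSlice]; exact hsz) ?_ j hj
        intro j' hj'
        rw [getD_pvZeroSlice, hsz]
        by_cases hm : j' ∈ pvRangeN (p * p) (limit + 1) (2 * p)
        · have hmem := (mem_pvRangeN (by omega) j').mp hm
          rw [if_pos ⟨hm, by omega⟩]
          constructor
          · omega
          · intro hs'
            exfalso
            have hs : pvSurv p j' := pvSurv_mono (by omega) hs'
            have := ((pvSurv_succ2 p j' h3 hodd hp).mp hs').2
            exact this ((pvMarked_iff p j' limit h3 hodd hj' hs).mp ⟨hmem.1, hmem.2.1, by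
              rcases hmem.2.2 with ⟨c, hc⟩; exact ⟨c, hc⟩⟩)
        · rw [if_neg (fun h => hm h.1)]
          rw [hinv j' hj', pvSurv_succ2 p j' h3 hodd hp]
          constructor
          · intro hs
            refine ⟨hs, fun hpj => ?_⟩
            exact hm ((mem_pvRangeN (by omega) j').mpr
              ⟨hpj.2, by omega, ((pvMarked_iff p j' limit h3 hodd hj' hs).mpr hpj).2.2⟩)
          · exact fun h => h.1
      · -- p is composite: nothing marked
        have hnsp : ¬ pvSurv p p := fun h => hg ((hinv p hple).mpr h)
        have hnp : ¬ p.Prime := fun h => hnsp (pvSurv_of_prime p p h)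
        rw [if_neg hg]
        refine ih (p + 2) s (by omega) (by omega) (by omega) hsz ?_ j hj
        intro j' hj'
        rw [hinv j' hj', pvSurv_succ2_notprime p j' h3 hodd hnp]
    · rw [pvRangeN, dif_neg (by omega)]
      simp only [List.foldl_nil]
      rw [hinv j hj]
      exact ⟨fun hs => prime_of_pvSurv hj (by omega) hs, fun hp => pvSurv_of_prime _ _ hp⟩

theorem getD_pvSieveLoop (limit : Nat) (h2 : 2 ≤ limit) (j : Nat) (hj : j ≤ limit) :
    ((pvSieveLoop limit).getD j 0 = 1 ↔ j.Prime) := by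
  unfold pvSieveLoop
  exact sieve_fold_inv limit (Nat.sqrt limit + 1 - 3) 3 (pvSieveBase limit) (by norm_num)
    (by omega) (le_refl _) (size_pvSieveBase limit)
    (fun j' hj' => getD_pvSieveBase limit j' h2 hj') j hj

theorem mem_pvSievePrimes (limit p : Nat) :
    p ∈ pvSievePrimes limit ↔ p.Prime ∧ p ≤ limit := by
  unfold pvSievePrimes
  by_cases hl : limit < 2
  · rw [if_pos hl]
    simp only [List.not_mem_nil, false_iff]
    rintro ⟨hp, hle⟩
    have := hp.two_le
    omega
  · rw [if_neg hl]
    simp only [List.mem_cons, List.mem_filter, decide_eq_true_eq]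
    constructor
    · rintro (rfl | ⟨hm, hs⟩)
      · exact ⟨Nat.prime_two, by omega⟩
      · have hmem := (mem_pvRangeN (by norm_num) p).mp hm
        exact ⟨(getD_pvSieveLoop limit (by omega) p (by omega)).mp hs, by omega⟩
    · rintro ⟨hp, hle⟩
      by_cases hp2 : p = 2
      · exact Or.inl hp2
      · have h2p := hp.two_le
        have hodd : ¬ 2 ∣ p := fun hd =>
          hp2 ((Nat.prime_dvd_prime_iff_eq Nat.prime_two hp).mp hd).symm
        refine Or.inr ⟨(mem_pvRangeN (by norm_num) p).mpr ⟨by omega, by omega, by omega⟩, ?_⟩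
        exact (getD_pvSieveLoop limit (by omega) p hle).mpr hp

theorem pvDvdSubSelf {p j : Nat} (h : p ∣ j) : p ∣ (j - p) := by
  obtain ⟨c, rfl⟩ := h
  rcases c with _ | d
  · simp
  · refine ⟨d, ?_⟩
    have e : p * (d + 1) = p * d + p := by ring
    omega

theorem size_foldl_bad (n : Nat) (l : List Nat) (arr : Array Nat) :
    ((l.foldl (fun a p => if p % 3 = 1 then pvZeroSlice a p (n + 1) p else a) arr)).size = arr.size := by
  induction l generalizing arr with
  | nil => rfl
  | cons x l ih =>
    rw [List.foldl_cons]
    by_cases hx : x % 3 = 1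
    · rw [if_pos hx, ih, size_pvZeroSlice]
    · rw [if_neg hx, ih]

theorem getD_foldl_bad (n : Nat) (l : List Nat) (arr : Array Nat) (j : Nat) :
    ((l.foldl (fun a p => if p % 3 = 1 then pvZeroSlice a p (n + 1) p else a) arr)).getD j 0 =
      if (∃ p ∈ l, p % 3 = 1 ∧ j ∈ pvRangeN p (n + 1) p) ∧ j < arr.size then 0
      else arr.getD j 0 := by
  induction l generalizing arr with
  | nil => simp
  | cons x l ih =>
    rw [List.foldl_cons]
    by_cases hs : j < arr.size
    · by_cases hx : x % 3 = 1
      · rw [if_pos hx, ih, size_pvZeroSlice, getD_pvZeroSlice]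
        by_cases hex : ∃ p ∈ l, p % 3 = 1 ∧ j ∈ pvRangeN p (n + 1) p
        · rcases hex with ⟨p, hp1, hp2, hp3⟩
          rw [if_pos ⟨⟨p, hp1, hp2, hp3⟩, hs⟩,
            if_pos ⟨⟨p, List.mem_cons.mpr (Or.inr hp1), hp2, hp3⟩, hs⟩]
        · rw [if_neg (fun h => hex h.1)]
          by_cases hm : j ∈ pvRangeN x (n + 1) x
          · rw [if_pos ⟨hm, hs⟩, if_pos ⟨⟨x, List.mem_cons.mpr (Or.inl rfl), hx, hm⟩, hs⟩]
          · rw [if_neg (fun h => hm h.1), if_neg ?hng]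
            case hng =>
              rintro ⟨⟨p, hp1, hp2, hp3⟩, -⟩
              rcases List.mem_cons.mp hp1 with rfl | hpl
              · exact hm hp3
              · exact hex ⟨p, hpl, hp2, hp3⟩
      · rw [if_neg hx, ih]
        by_cases hex : ∃ p ∈ l, p % 3 = 1 ∧ j ∈ pvRangeN p (n + 1) p
        · rcases hex with ⟨p, hp1, hp2, hp3⟩
          rw [if_pos ⟨⟨p, hp1, hp2, hp3⟩, hs⟩,
            if_pos ⟨⟨p, List.mem_cons.mpr (Or.inr hp1), hp2, hp3⟩, hs⟩]
        · rw [if_neg (fun h => hex h.1), if_neg ?hng]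
          case hng =>
            rintro ⟨⟨p, hp1, hp2, hp3⟩, -⟩
            rcases List.mem_cons.mp hp1 with rfl | hpl
            · exact hx hp2
            · exact hex ⟨p, hpl, hp2, hp3⟩
    · by_cases hx : x % 3 = 1
      · rw [if_pos hx, ih, size_pvZeroSlice, getD_pvZeroSlice,
          if_neg (fun h => hs h.2), if_neg (fun h => hs h.2), if_neg (fun h => hs h.2)]
      · rw [if_neg hx, ih, if_neg (fun h => hs h.2), if_neg (fun h => hs h.2)]

theorem size_pvAllow3 (n : Nat) (primes : List Nat) : (pvAllow3 n primes).size = n + 1 := by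
  unfold pvAllow3
  rw [size_foldl_bad]
  by_cases h9 : 9 ≤ n
  · rw [if_pos h9, size_pvZeroSlice]
    simp [Array.size_setIfInBounds, Array.size_replicate]
  · rw [if_neg h9]
    simp [Array.size_setIfInBounds, Array.size_replicate]

theorem getD_pvAllow3 (n j : Nat) (h1 : 1 ≤ j) (hj : j ≤ n) :
    ((pvAllow3 n (pvSievePrimes n)).getD j 0 = 1 ↔ pvGood j) := by
  simp only [pvAllow3]
  have hbase : ((Array.replicate (n + 1) 1).setIfInBounds 0 0).getD j 0 = 1 := by
    rw [getD_setIfInBounds, getD_replicate_one]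
    simp only [Array.size_replicate]
    split_ifs <;> omega
  have hszb : ((Array.replicate (n + 1) 1).setIfInBounds 0 0).size = n + 1 := by
    simp [Array.size_setIfInBounds, Array.size_replicate]
  have ha1 : ∀ (a1 : Array Nat), a1.size = n + 1 → (a1.getD j 0 = 1 ↔ ¬ (9 ∣ j)) →
      (((pvSievePrimes n).foldl (fun a p => if p % 3 = 1 then pvZeroSlice a p (n + 1) p else a)
        a1).getD j 0 = 1 ↔ pvGood j) := by
    intro a1 hsz hch
    rw [getD_foldl_bad, hsz]
    by_cases hex : ∃ p ∈ pvSievePrimes n, p % 3 = 1 ∧ j ∈ pvRangeN p (n + 1) p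
    · rw [if_pos ⟨hex, by omega⟩]
      rcases hex with ⟨p, hp1, hp2, hp3⟩
      have hp := (mem_pvSievePrimes n p).mp hp1
      have hmem := (mem_pvRangeN (by have := hp.1.two_le; omega) j).mp hp3
      have hdvd : p ∣ j := by
        have h' : p ∣ (j - p) + p := dvd_add hmem.2.2 (dvd_refl p)
        rwa [Nat.sub_add_cancel hmem.1] at h'
      constructor
      · intro h; exact absurd h (by omega)
      · rintro ⟨-, hP⟩
        exact absurd hp2 (hP p hp.1 hdvd)
    · rw [if_neg (fun h => hex h.1), hch]
      unfold pvGood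
      constructor
      · intro h9
        refine ⟨h9, fun p hpp hpd h31 => hex ⟨p, ?_, h31, ?_⟩⟩
        · exact (mem_pvSievePrimes n p).mpr ⟨hpp, le_trans (Nat.le_of_dvd (by omega) hpd) hj⟩
        · refine (mem_pvRangeN (show 0 < p by have := hpp.two_le; omega) j).mpr
            ⟨Nat.le_of_dvd (by omega) hpd, by omega, pvDvdSubSelf hpd⟩
      · exact fun h => h.1
  by_cases h9 : 9 ≤ n
  · rw [if_pos h9]
    refine ha1 _ (by rw [size_pvZeroSlice]; exact hszb) ?_
    rw [getD_pvZeroSlice, hszb]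
    by_cases hm : j ∈ pvRangeN 9 (n + 1) 9
    · have hmem := (mem_pvRangeN (by norm_num) j).mp hm
      rw [if_pos ⟨hm, by omega⟩]
      constructor
      · intro h; exact absurd h (by omega)
      · intro h; exact absurd (by omega : (9:Nat) ∣ j) h
    · rw [if_neg (fun h => hm h.1), hbase]
      have : ¬ (9 ≤ j ∧ j < n + 1 ∧ 9 ∣ (j - 9)) := fun h => hm ((mem_pvRangeN (by norm_num) j).mpr h)
      constructor
      · intro _ hd
        exact this ⟨Nat.le_of_dvd (by omega) hd, by omega, by omega⟩
      · intro _; rfl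
  · rw [if_neg h9]
    refine ha1 _ hszb ?_
    rw [hbase]
    constructor
    · intro _ hd
      have := Nat.le_of_dvd (by omega) hd
      omega
    · intro _; rfl

theorem getD_pvNo3 (n j : Nat) (h1 : 1 ≤ j) (hj : j ≤ n) :
    ((pvNo3 n (pvAllow3 n (pvSievePrimes n))).getD j 0 = 1 ↔ (pvGood j ∧ ¬ 3 ∣ j)) := by
  unfold pvNo3
  by_cases h3 : 3 ≤ n
  · rw [if_pos h3, getD_pvZeroSlice, size_pvAllow3]
    by_cases hm : j ∈ pvRangeN 3 (n + 1) 3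
    · have hmem := (mem_pvRangeN (by norm_num) j).mp hm
      rw [if_pos ⟨hm, by omega⟩]
      constructor
      · intro h; exact absurd h (by omega)
      · rintro ⟨-, hd⟩
        exact absurd (by omega : (3:Nat) ∣ j) hd
    · rw [if_neg (fun h => hm h.1), getD_pvAllow3 n j h1 hj]
      have hnm : ¬ (3 ≤ j ∧ j < n + 1 ∧ 3 ∣ (j - 3)) := fun h => hm ((mem_pvRangeN (by norm_num) j).mpr h)
      constructor
      · intro hg
        refine ⟨hg, fun hd => ?_⟩
        have := Nat.le_of_dvd (by omega) hd
        exact hnm ⟨by omega, by omega, by omega⟩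
      · exact fun h => h.1
  · rw [if_neg h3, getD_pvAllow3 n j h1 hj]
    constructor
    · intro hg
      refine ⟨hg, fun hd => ?_⟩
      have := Nat.le_of_dvd (by omega) hd
      omega
    · exact fun h => h.1

theorem pvMinFacEq (p : Nat) (hp : p.Prime) : p.minFac = p := (Nat.prime_def_minFac.mp hp).2

theorem pvMinFacComposite {j : Nat} (h2 : 2 ≤ j) (hnp : ¬ j.Prime) : j.minFac < j := by
  have hd := Nat.minFac_dvd j
  have hle := Nat.le_of_dvd (by omega) hd
  rcases Nat.lt_or_ge j.minFac j with h | h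
  · exact h
  · have heq : j.minFac = j := by omega
    exact absurd (heq ▸ Nat.minFac_prime (by omega : j ≠ 1)) hnp

theorem pvDvdSubMul {i j : Nat} (h : i ∣ j) : i ∣ (j - i * i) := by
  obtain ⟨c, rfl⟩ := h
  by_cases hc : i ≤ c
  · refine ⟨c - i, ?_⟩
    have e : i * (c - i) = i * c - i * i := by
      have e1 : i + (c - i) = c := by omega
      have e2 : i * (i + (c - i)) = i * i + i * (c - i) := by ring
      rw [e1] at e2
      omega
    omega
  · have : i * c ≤ i * i := Nat.mul_le_mul_left i (by omega)
    have : i * c - i * i = 0 := by omega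
    simp [this]

theorem getD_spf_init (n j : Nat) :
    ((List.range (n + 1)).toArray).getD j 0 = if j < n + 1 then j else 0 := by
  rw [Array.getD_eq_getD_getElem?, List.getElem?_toArray]
  by_cases h : j < n + 1
  · rw [List.getElem?_eq_getElem (by simpa using h)]
    simp [h]
  · rw [List.getElem?_eq_none (by simpa using Nat.le_of_not_lt h)]
    simp [h]

theorem spf_fold_inv (n : Nat) :
    ∀ (k i : Nat) (f : Array Nat), 2 ≤ i → Nat.sqrt n + 1 - i ≤ k → f.size = n + 1 →
      (∀ j, 1 ≤ j → j ≤ n → f.getD j 0 = if j.minFac < i then j.minFac else j) →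
      ∀ j, 1 ≤ j → j ≤ n →
        (((pvRangeN i (Nat.sqrt n + 1) 1).foldl
          (fun f i =>
            if f.getD i 0 = i then
              (pvRangeN (i * i) (n + 1) i).foldl
                (fun g j => if g.getD j 0 = j then g.setIfInBounds j i else g) f
            else f) f).getD j 0 = j.minFac) := by
  intro k
  induction k with
  | zero =>
    intro i f h2 hk hsz hinv j h1 hj
    rw [pvRangeN, dif_neg (by omega), List.foldl_nil, hinv j h1 hj]
    by_cases hp : j.minFac < i
    · rw [if_pos hp]
    · rw [if_neg hp]
      by_cases hj1 : j = 1
      · subst hj1; simp [Nat.minFac_one]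
      · by_cases hjp : j.Prime
        · exact (pvMinFacEq j hjp).symm
        · exfalso
          have hc : j.minFac ^ 2 ≤ j := Nat.minFac_sq_le_self (by omega) hjp
          have : j.minFac ≤ Nat.sqrt n := Nat.le_sqrt'.mpr (le_trans hc hj)
          omega
  | succ k ih =>
    intro i f h2 hk hsz hinv j h1 hj
    by_cases hlt : i < Nat.sqrt n + 1
    · rw [pvRangeN, dif_pos ⟨hlt, by norm_num⟩, List.foldl_cons]
      have hile : i ≤ n := le_trans (by omega) (Nat.sqrt_le_self n)
      have hfi : f.getD i 0 = if i.minFac < i then i.minFac else i := hinv i (by omega) hile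
      by_cases hip : i.Prime
      · -- i prime: guard holds, mark multiples
        have hg : f.getD i 0 = i := by
          rw [hfi, pvMinFacEq i hip]
          simp
        rw [if_pos hg]
        refine ih (i + 1) _ (by omega) (by omega) (by rw [size_foldl_mark]; exact hsz) ?_ j h1 hj
        intro j' h1' hj'
        rw [getD_foldl_mark i _ (pvRangeN_pairwise _ _ _ (by omega)) _ _, hsz]
        by_cases hA : j'.minFac < i
        · have hfj : f.getD j' 0 = j'.minFac := by rw [hinv j' h1' hj', if_pos hA]
          have hcond : ¬ (j' ∈ pvRangeN (i * i) (n + 1) i ∧ f.getD j' 0 = j' ∧ j' < n + 1) := by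
            rintro ⟨hm, hfj', -⟩
            have hmem := (mem_pvRangeN (by omega) j').mp hm
            have : j'.minFac = j' := by omega
            have : j' < i := by omega
            nlinarith
          rw [if_neg hcond, hfj, if_pos (by omega)]
        · have hfj : f.getD j' 0 = j' := by rw [hinv j' h1' hj', if_neg hA]
          by_cases hB : i ∣ j'
          · have hmle : j'.minFac ≤ i := Nat.minFac_le_of_dvd (by omega) hB
            have hmeq : j'.minFac = i := by omega
            by_cases hji : j' = i
            · subst hji
              have hnm : ¬ (j' ∈ pvRangeN (j' * j') (n + 1) j' ∧ f.getD j' 0 = j' ∧ j' < n + 1) := by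
                rintro ⟨hm, -, -⟩
                have := (mem_pvRangeN (by omega) j').mp hm
                nlinarith
              rw [if_neg hnm, hfj, hmeq]
              simp
            · -- j' is a proper multiple of i with minFac = i, so j' ≥ i*i
              obtain ⟨c, rfl⟩ := hB
              have hc2 : 2 ≤ c := by
                rcases Nat.lt_or_ge c 2 with h | h
                · exfalso
                  interval_cases c
                  · simp at h1'
                  · simp at hji
                · exact h
              have hcmf : i ≤ c.minFac := by
                have : c.minFac ∣ i * c := Dvd.dvd.mul_left (Nat.minFac_dvd c) i
                have h' := hmeq ▸ Nat.minFac_le_of_dvd (Nat.minFac_prime (by omega : c ≠ 1)).two_le this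
                exact h'
              have hcge : i ≤ c := le_trans hcmf (Nat.minFac_le (by omega))
              have hsq : i * i ≤ i * c := Nat.mul_le_mul_left i hcge
              have hm : (i * c) ∈ pvRangeN (i * i) (n + 1) i :=
                (mem_pvRangeN (by omega) _).mpr ⟨hsq, by omega, pvDvdSubMul ⟨c, rfl⟩⟩
              rw [if_pos ⟨hm, hfj, by omega⟩, hmeq]
              simp
          · have hnm : ¬ (j' ∈ pvRangeN (i * i) (n + 1) i ∧ f.getD j' 0 = j' ∧ j' < n + 1) := by
              rintro ⟨hm, -, -⟩
              have hmem := (mem_pvRangeN (by omega) j').mp hm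
              have hd : i ∣ j' := by
                have h' : i ∣ (j' - i * i) + i * i := dvd_add hmem.2.2 ⟨i, rfl⟩
                rwa [Nat.sub_add_cancel hmem.1] at h'
              exact hB hd
            rw [if_neg hnm, hfj]
            have : j'.minFac ≠ i := fun h => hB (h ▸ Nat.minFac_dvd j')
            rw [hinv j' h1' hj', if_neg hA] at hfj
            by_cases hC : j'.minFac < i + 1
            · omega
            · rw [if_neg hC]
      · -- i composite: guard fails
        have hmlt : i.minFac < i := pvMinFacComposite h2 hip
        have hg : ¬ f.getD i 0 = i := by
          rw [hfi, if_pos hmlt]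
          omega
        rw [if_neg hg]
        refine ih (i + 1) f (by omega) (by omega) hsz ?_ j h1 hj
        intro j' h1' hj'
        rw [hinv j' h1' hj']
        have hne : j'.minFac ≠ i := by
          by_cases hj1 : j' = 1
          · subst hj1; rw [Nat.minFac_one]; omega
          · intro h
            exact hip (h ▸ Nat.minFac_prime hj1)
        by_cases hA : j'.minFac < i
        · have hpi : j'.minFac < i + 1 := by omega
          rw [if_pos hA, if_pos hpi]
        · have hni : ¬ j'.minFac < i + 1 := by omega
          rw [if_neg hA, if_neg hni]
    · rw [pvRangeN, dif_neg (by omega), List.foldl_nil, hinv j h1 hj]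
      by_cases hp : j.minFac < i
      · rw [if_pos hp]
      · rw [if_neg hp]
        by_cases hj1 : j = 1
        · subst hj1; simp [Nat.minFac_one]
        · by_cases hjp : j.Prime
          · exact (pvMinFacEq j hjp).symm
          · exfalso
            have hc : j.minFac ^ 2 ≤ j := Nat.minFac_sq_le_self (by omega) hjp
            have : j.minFac ≤ Nat.sqrt n := Nat.le_sqrt'.mpr (le_trans hc hj)
            omega

theorem getD_pvSpf (n j : Nat) (h1 : 1 ≤ j) (hj : j ≤ n) :
    (pvSpf n).getD j 0 = j.minFac := by
  unfold pvSpf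
  refine spf_fold_inv n (Nat.sqrt n + 1 - 2) 2 _ (le_refl _) (le_refl _) ?_ ?_ j h1 hj
  · simp
  · intro j' h1' hj'
    rw [getD_spf_init, if_pos (by omega)]
    by_cases hj1 : j' = 1
    · subst hj1
      simp [Nat.minFac_one]
    · have h2 : 2 ≤ j'.minFac := (Nat.minFac_prime hj1).two_le
      rw [if_neg (by omega)]

theorem getD_replicate_zero (n j : Nat) :
    (Array.replicate n (0 : Nat)).getD j 0 = 0 := by
  rw [Array.getD_eq_getD_getElem?, Array.getElem?_replicate]
  split_ifs <;> simp

theorem allowed_fold_inv (n : Nat) :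
    ∀ (k m : Nat) (a : Array Nat), 2 ≤ m → n + 1 - m ≤ k → a.size = n + 1 →
      (∀ j, 1 ≤ j → j < m → j ≤ n → (a.getD j 0 = 1 ↔ pvGood j)) →
      (∀ j, m ≤ j → a.getD j 0 = 0) →
      ∀ j, 1 ≤ j → j ≤ n →
        (((pvRangeN m (n + 1) 1).foldl
          (fun a m =>
            let p := (pvSpf n).getD m 0
            let q := m / p
            if p % 3 = 1 ∨ (p = 3 ∧ q % 3 = 0) then a
            else a.setIfInBounds m (a.getD q 0))
          a).getD j 0 = 1 ↔ pvGood j) := by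
  intro k
  induction k with
  | zero =>
    intro m a h2 hk hsz hchar hzero j h1 hj
    rw [pvRangeN, dif_neg (by omega), List.foldl_nil]
    exact hchar j h1 (by omega) hj
  | succ k ih =>
    intro m a h2 hk hsz hchar hzero j h1 hj
    by_cases hlt : m < n + 1
    · rw [pvRangeN, dif_pos ⟨hlt, by norm_num⟩, List.foldl_cons]
      have hmn : m ≤ n := by omega
      have hspf : (pvSpf n).getD m 0 = m.minFac := getD_pvSpf n m (by omega) hmn
      have hp : m.minFac.Prime := Nat.minFac_prime (by omega)
      have hple : m.minFac ∣ m := Nat.minFac_dvd m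
      have hplem : m.minFac ≤ m := Nat.le_of_dvd (by omega) hple
      have hq1 : 1 ≤ m / m.minFac := (Nat.one_le_div_iff (by have := hp.two_le; omega)).mpr hplem
      have hqlt : m / m.minFac < m := Nat.div_lt_self (by omega) (by have := hp.two_le; omega)
      have hstep := pvGood_step m h2
      simp only [hspf]
      by_cases hc : m.minFac % 3 = 1 ∨ (m.minFac = 3 ∧ (m / m.minFac) % 3 = 0)
      · rw [if_pos hc]
        refine ih (m + 1) a (by omega) (by omega) hsz ?_ (fun j' hj' => hzero j' (by omega)) j h1 hj
        intro j' h1' hjm' hj'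
        by_cases hje : j' = m
        · subst hje
          rw [hzero j' (le_refl _)]
          have : ¬ pvGood j' := fun hg => ((hstep.mp hg).1) hc
          constructor
          · intro h; exact absurd h (by omega)
          · intro h; exact absurd h this
        · exact hchar j' h1' (by omega) hj'
      · rw [if_neg hc]
        refine ih (m + 1) _ (by omega) (by omega)
          (by rw [Array.size_setIfInBounds]; exact hsz) ?_ ?_ j h1 hj
        · intro j' h1' hjm' hj'
          rw [getD_setIfInBounds]
          by_cases hje : j' = m
          · subst hje
            rw [if_pos ⟨rfl, by omega⟩]
            rw [hchar (j' / j'.minFac) hq1 hqlt (by omega)]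
            constructor
            · intro hgq
              exact hstep.mpr ⟨hc, hgq⟩
            · intro hg
              exact (hstep.mp hg).2
          · rw [if_neg (fun h => hje h.1.symm)]
            exact hchar j' h1' (by omega) hj'
        · intro j' hj'
          rw [getD_setIfInBounds, if_neg (fun h => by omega)]
          exact hzero j' (by omega)
    · rw [pvRangeN, dif_neg (by omega), List.foldl_nil]
      exact hchar j h1 (by omega) hj

theorem getD_pvAllowed (n j : Nat) (h1 : 1 ≤ j) (hj : j ≤ n) :
    ((pvAllowed n (pvSpf n)).getD j 0 = 1 ↔ pvGood j) := by
  simp only [pvAllowed]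
  have hn1 : 1 ≤ n := by omega
  rw [if_pos hn1]
  refine allowed_fold_inv n (n + 1 - 2) 2 _ (le_refl _) (le_refl _)
    (by simp [Array.size_setIfInBounds, Array.size_replicate]) ?_ ?_ j h1 hj
  · intro j' h1' hjm' hj'
    have : j' = 1 := by omega
    subst this
    rw [getD_setIfInBounds, if_pos ⟨rfl, by simp [Array.size_replicate]; omega⟩]
    exact ⟨fun _ => pvGood_one, fun _ => rfl⟩
  · intro j' hj'
    rw [getD_setIfInBounds, if_neg (fun h => by omega), getD_replicate_zero]

theorem pref_fold_eq (n : Nat) (A N B : Array Nat)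
    (hAB : ∀ i, 1 ≤ i → i ≤ n → (A.getD i 0 = 1 ↔ B.getD i 0 = 1))
    (hN : ∀ i, 1 ≤ i → i ≤ n → (N.getD i 0 = 1 ↔ (B.getD i 0 = 1 ∧ i % 3 ≠ 0))) :
    ∀ (l : List Nat), (∀ i ∈ l, 1 ≤ i ∧ i ≤ n) → ∀ (st : Int × Int × List Int × List Int),
      (l.foldl (fun st i =>
        let s1 := if A.getD i 0 = 1 then st.1 + (i : Int) else st.1
        let s2 := if N.getD i 0 = 1 then st.2.1 + (i : Int) else st.2.1
        (s1, s2, st.2.2.1 ++ [s1], st.2.2.2 ++ [s2])) st)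
      = (l.foldl (fun st i =>
        if B.getD i 0 = 1 then
          let s1 := st.1 + (i : Int)
          let s2 := if i % 3 ≠ 0 then st.2.1 + (i : Int) else st.2.1
          (s1, s2, st.2.2.1 ++ [s1], st.2.2.2 ++ [s2])
        else (st.1, st.2.1, st.2.2.1 ++ [st.1], st.2.2.2 ++ [st.2.1])) st) := by
  intro l
  induction l with
  | nil => intro _ st; rfl
  | cons x l ih =>
    intro hmem st
    rw [List.foldl_cons, List.foldl_cons]
    have hx := hmem x (List.mem_cons.mpr (Or.inl rfl))
    have htail : ∀ i ∈ l, 1 ≤ i ∧ i ≤ n := fun i hi => hmem i (List.mem_cons.mpr (Or.inr hi))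
    have hstep :
        (let s1 := if A.getD x 0 = 1 then st.1 + (x : Int) else st.1
         let s2 := if N.getD x 0 = 1 then st.2.1 + (x : Int) else st.2.1
         (s1, s2, st.2.2.1 ++ [s1], st.2.2.2 ++ [s2]))
        = (if B.getD x 0 = 1 then
            let s1 := st.1 + (x : Int)
            let s2 := if x % 3 ≠ 0 then st.2.1 + (x : Int) else st.2.1
            (s1, s2, st.2.2.1 ++ [s1], st.2.2.2 ++ [s2])
          else (st.1, st.2.1, st.2.2.1 ++ [st.1], st.2.2.2 ++ [st.2.1])) := by
      dsimp only
      by_cases hB : B.getD x 0 = 1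
      · have hA : A.getD x 0 = 1 := (hAB x hx.1 hx.2).mpr hB
        by_cases h3 : x % 3 = 0
        · have hNx : ¬ N.getD x 0 = 1 := fun h => (((hN x hx.1 hx.2).mp h).2) h3
          rw [if_pos hA, if_neg hNx, if_pos hB, if_neg (show ¬ x % 3 ≠ 0 by omega)]
        · have hNx : N.getD x 0 = 1 := (hN x hx.1 hx.2).mpr ⟨hB, h3⟩
          rw [if_pos hA, if_pos hNx, if_pos hB, if_pos h3]
      · have hA : ¬ A.getD x 0 = 1 := fun h => hB ((hAB x hx.1 hx.2).mp h)
        have hNx : ¬ N.getD x 0 = 1 := fun h => hB ((hN x hx.1 hx.2).mp h).1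
        rw [if_neg hA, if_neg hNx, if_neg hB]
    rw [hstep]
    exact ih htail _

theorem inert_prefix_sums_eq (limit : Int) :
    inert_prefix_sums limit = inert_prefix_sums_alt limit := by
  simp only [inert_prefix_sums, inert_prefix_sums_alt]
  rw [pref_fold_eq limit.toNat
    (pvAllow3 limit.toNat (pvSievePrimes limit.toNat))
    (pvNo3 limit.toNat (pvAllow3 limit.toNat (pvSievePrimes limit.toNat)))
    (pvAllowed limit.toNat (pvSpf limit.toNat))
    (fun i h1 h2 => by rw [getD_pvAllow3 limit.toNat i h1 h2, getD_pvAllowed limit.toNat i h1 h2])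
    (fun i h1 h2 => by
      rw [getD_pvNo3 limit.toNat i h1 h2, getD_pvAllowed limit.toNat i h1 h2]
      constructor
      · rintro ⟨a, b⟩; exact ⟨a, by omega⟩
      · rintro ⟨a, b⟩; exact ⟨a, by omega⟩)
    (pvRangeN 1 (limit.toNat + 1) 1)
    (fun i hi => by
      have := (mem_pvRangeN (by norm_num) i).mp hi
      exact ⟨by omega, by omega⟩)
    (0, 0, [0], [0])]

-- ===== VERDICT (by name: the statement is the Claim_ definition above) =====
theorem inert_prefix_sums_spec : Claim_equal_inert_prefix_sums := by
  intro limit _ _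
  unfold Spec_inert_prefix_sums
  exact inert_prefix_sums_eq limit
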